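-- pv_equiv track=rewrite | github.com/GianC0/KeystrokeDynamicsProjectINSA | keylogger/nearest_neighbours.py | get_press_time_of_key
-- ===== SOURCE A (Python) =====
-- def get_press_time_of_key(attempt, key_index):
--     press_count = 0
--     for entry in attempt:
--         if entry[2].endswith("PRESS"):
--             if press_count == key_index:
--                 return entry[0]
--             press_count += 1
--     return None
-- ===== SOURCE B (Python) =====
-- def get_press_time_of_key(attempt, key_index):
--     # Pass 1: count the PRESS entries.
--     total = sum(1 for e in attempt if e[2].endswith("PRESS"))
--     if key_index < 0 or key_index >= total:
--         return None
--     # Pass 2: walk the attempt backwards, counting down to the target press.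
--     remaining = total - key_index
--     for e in reversed(attempt):
--         if e[2].endswith("PRESS"):
--             remaining -= 1
--             if remaining == 0:
--                 return e[0]
-- ===== Notes on version B (the rewrite author's own statement) =====
-- stated objective: alternative
-- what changed: Replaces the forward scan-and-count with early return by a two-phase algorithm: a counting pass over the whole attempt to get the total number of PRESS entries, a range check against that total, then a backward scan over the reversed attempt that counts down to the target press.
import Mathlib
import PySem

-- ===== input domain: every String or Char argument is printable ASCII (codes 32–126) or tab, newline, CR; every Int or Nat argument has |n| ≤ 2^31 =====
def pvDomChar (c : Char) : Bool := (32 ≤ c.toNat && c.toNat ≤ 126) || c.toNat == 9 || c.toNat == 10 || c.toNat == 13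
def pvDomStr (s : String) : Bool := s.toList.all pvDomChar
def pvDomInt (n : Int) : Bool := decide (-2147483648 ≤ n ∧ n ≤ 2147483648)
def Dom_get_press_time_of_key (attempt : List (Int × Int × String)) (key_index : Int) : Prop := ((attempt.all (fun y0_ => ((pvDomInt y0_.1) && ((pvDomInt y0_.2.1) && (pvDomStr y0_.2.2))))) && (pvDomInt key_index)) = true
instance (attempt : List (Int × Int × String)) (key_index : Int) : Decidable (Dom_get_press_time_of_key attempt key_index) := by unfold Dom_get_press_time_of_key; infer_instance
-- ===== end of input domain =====

-- B replaces A's forward scan-and-count with early return by a counting pass over the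
-- whole attempt plus a backward scan of the reversed attempt counting down to the
-- target press; objective: alternative (same cost, different traversal).
-- ===== PORT A =====
def pvALoop (rest : List (Int × Int × String)) (press_count key_index : Int) : Option Int :=
  match rest with
  | [] => none
  | entry :: rest =>
    if PySem.Str.endswith entry.2.2 "PRESS" then
      if press_count == key_index then some entry.1
      else pvALoop rest (press_count + 1) key_index
    else pvALoop rest press_count key_index

def get_press_time_of_key (attempt : List (Int × Int × String)) (key_index : Int) : Option Int :=
  pvALoop attempt 0 key_index

-- ===== PORT B =====
-- the backward scan: 'for e in reversed(attempt)' over the reversed list, counting down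
def pvBLoop (rest : List (Int × Int × String)) (remaining : Int) : Option Int :=
  match rest with
  | [] => none
  | e :: rest =>
    if PySem.Str.endswith e.2.2 "PRESS" then
      if remaining - 1 == 0 then some e.1
      else pvBLoop rest (remaining - 1)
    else pvBLoop rest remaining

def get_press_time_of_key_alt (attempt : List (Int × Int × String)) (key_index : Int) : Option Int :=
  let total : Int := attempt.foldl (fun acc e => if PySem.Str.endswith e.2.2 "PRESS" then acc + 1 else acc) 0
  if key_index < 0 ∨ key_index ≥ total then none
  else pvBLoop attempt.reverse (total - key_index)

-- ===== PRECONDITION & SPEC =====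
def Spec_get_press_time_of_key (attempt : List (Int × Int × String)) (key_index : Int) (out : Option Int) : Prop := out = get_press_time_of_key_alt attempt key_index
instance (attempt : List (Int × Int × String)) (key_index : Int) (out : Option Int) : Decidable (Spec_get_press_time_of_key attempt key_index out) := by unfold Spec_get_press_time_of_key; infer_instance

-- ===== CLAIM (what is proved, stated in full; the proofs are below) =====
def Claim_equal_get_press_time_of_key : Prop := ∀ (attempt : List (Int × Int × String)) (key_index : Int), Dom_get_press_time_of_key attempt key_index → Spec_get_press_time_of_key attempt key_index (get_press_time_of_key attempt key_index)

-- ===== LEMMAS AND PROOFS =====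

-- the filtered press-timestamp list (proof-only abbreviation)
def pvPresses (l : List (Int × Int × String)) : List Int :=
  (l.filter (fun e => PySem.Str.endswith e.2.2 "PRESS")).map (fun e => e.1)

lemma pvALoop_eq (rest : List (Int × Int × String)) (c k : Int) :
    pvALoop rest c k =
      (if 0 ≤ k - c ∧ k - c < (pvPresses rest).length then (pvPresses rest)[(k - c).toNat]? else none) := by
  induction rest generalizing c with
  | nil => simp [pvALoop, pvPresses]
  | cons e rest ih =>
    simp only [pvALoop]
    by_cases hp : PySem.Str.endswith e.2.2 "PRESS" = true
    · simp only [pvPresses, List.filter_cons, hp, if_true, List.map_cons]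
      by_cases hck : c = k
      · subst hck
        have h0 : (c - c).toNat = 0 := by omega
        simp only [beq_self_eq_true, if_true, h0]
        rw [if_pos ⟨by omega, by simp only [List.length_cons]; push_cast; omega⟩]
        simp
      · have hbeq : (c == k) = false := by simp [hck]
        rw [hbeq]
        simp only [Bool.false_eq_true, if_false, ih (c + 1), pvPresses]
        set l := (rest.filter (fun e => PySem.Str.endswith e.2.2 "PRESS")).map (fun e => e.1) with hl
        by_cases h0 : 0 ≤ k - (c + 1)
        · have ht : (k - c).toNat = (k - (c + 1)).toNat + 1 := by omega
          by_cases h2 : k - (c + 1) < (l.length : Int)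
          · rw [if_pos ⟨h0, h2⟩, if_pos ⟨by omega, by simp only [List.length_cons]; push_cast; omega⟩, ht]
            simp
          · rw [if_neg (by omega), if_neg (by simp only [List.length_cons]; push_cast; omega)]
        · rw [if_neg (by omega), if_neg (by omega)]
    · have hpf : PySem.Str.endswith e.2.2 "PRESS" = false := by simpa using hp
      simp only [List.filter_cons, hpf, Bool.false_eq_true, if_false, pvPresses] at ih ⊢
      exact ih c

lemma pvBLoop_eq (rest : List (Int × Int × String)) (r : Int) :
    pvBLoop rest r =
      (if 1 ≤ r ∧ r ≤ (pvPresses rest).length then (pvPresses rest)[(r - 1).toNat]? else none) := by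
  induction rest generalizing r with
  | nil => simp [pvBLoop, pvPresses]
  | cons e rest ih =>
    simp only [pvBLoop]
    by_cases hp : PySem.Str.endswith e.2.2 "PRESS" = true
    · simp only [pvPresses, List.filter_cons, hp, if_true, List.map_cons]
      by_cases hr1 : r = 1
      · subst hr1
        norm_num
      · have hbeq : (r - 1 == 0) = false := by simp; omega
        rw [hbeq]
        simp only [Bool.false_eq_true, if_false, ih (r - 1), pvPresses]
        set l := (rest.filter (fun e => PySem.Str.endswith e.2.2 "PRESS")).map (fun e => e.1) with hl
        by_cases h0 : 1 ≤ r - 1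
        · have ht : (r - 1).toNat = (r - 1 - 1).toNat + 1 := by omega
          by_cases h2 : r - 1 ≤ (l.length : Int)
          · rw [if_pos ⟨h0, h2⟩, if_pos ⟨by omega, by simp only [List.length_cons]; push_cast; omega⟩, ht]
            simp
          · rw [if_neg (by omega), if_neg (by simp only [List.length_cons]; push_cast; omega)]
        · rw [if_neg (by omega), if_neg (by omega)]
    · have hpf : PySem.Str.endswith e.2.2 "PRESS" = false := by simpa using hp
      simp only [List.filter_cons, hpf, Bool.false_eq_true, if_false, pvPresses] at ih ⊢
      exact ih r

lemma pvTotal_eq (l : List (Int × Int × String)) (a : Int) :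
    l.foldl (fun acc e => if PySem.Str.endswith e.2.2 "PRESS" then acc + 1 else acc) a
      = a + (pvPresses l).length := by
  induction l generalizing a with
  | nil => simp [pvPresses]
  | cons e rest ih =>
    simp only [List.foldl_cons, pvPresses, List.filter_cons]
    by_cases hp : PySem.Str.endswith e.2.2 "PRESS" = true
    · simp only [hp, if_true, ih, pvPresses, List.map_cons, List.length_cons]
      push_cast; ring
    · have hpf : PySem.Str.endswith e.2.2 "PRESS" = false := by simpa using hp
      simp only [hpf, Bool.false_eq_true, if_false, ih, pvPresses]

lemma pvPresses_reverse (l : List (Int × Int × String)) :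
    pvPresses l.reverse = (pvPresses l).reverse := by
  simp [pvPresses, List.filter_reverse, List.map_reverse]

-- ===== VERDICT (by name: the statement is the Claim_ definition above) =====
theorem get_press_time_of_key_spec : Claim_equal_get_press_time_of_key := by
  intro attempt key_index _
  unfold Spec_get_press_time_of_key get_press_time_of_key get_press_time_of_key_alt
  rw [pvALoop_eq, pvTotal_eq]
  simp only [zero_add, sub_zero]
  set P := pvPresses attempt with hP
  by_cases hk : key_index < 0 ∨ key_index ≥ (P.length : Int)
  · rw [if_pos hk, if_neg (by omega)]
  · rw [if_neg hk, if_pos ⟨by omega, by omega⟩, pvBLoop_eq, pvPresses_reverse, ← hP]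
    rw [if_pos ⟨by omega, by simp only [List.length_reverse]; omega⟩]
    have h1 : ((P.length : Int) - key_index - 1).toNat = P.length - 1 - key_index.toNat := by omega
    have h2 : key_index.toNat < P.length := by omega
    rw [h1, List.getElem?_reverse (by omega)]
    congr 1
    omega
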